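-- pv_equiv track=rewrite | github.com/abhaypawar/submission_assessment | Set 3/Problem 7/smaller_than_mean.py | binarysearchcount
-- ===== SOURCE A (Python) =====
-- def binarysearchcount(a, n, k):
--     left = 0
--     right = n - 1
--     count = 0
--     while (left <= right):
--         mid = int((right + left) / 2)
--         if (a[mid] <= k):
--             count = mid + 1
--             left = mid + 1
--         else:
--             right = mid - 1
--     return count
-- ===== SOURCE B (Python) =====
-- def binarysearchcount(a, n, k):
--     if n <= 0:
--         return 0
--
--     def go(seg, base):
--         # seg is the current window of the array, base its absolute start index
--         if not seg:
--             return 0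
--         m = (len(seg) - 1) // 2
--         if seg[m] <= k:
--             r = go(seg[m + 1:], base + m + 1)
--             return r if r else base + m + 1
--         return go(seg[:m], base)
--
--     return go(a[:n], 0)
-- ===== Notes on version B (the rewrite author's own statement) =====
-- stated objective: alternative
-- what changed: Replaced the iterative while-loop mutating left/right/count over index bounds with a structural recursion on list slices: a helper takes the current window as an actual sublist plus its base offset, computes the midpoint from the window length, recurses on seg[m+1:] or seg[:m], and combines results ('deeper success or base+m+1') instead of maintaining a count accumulator.
-- outside the precondition, e.g. on binarysearchcount([5, 6], 3, 0): A returns 0, B returns 0; on binarysearchcount([5, 6], 3, 5): A returns 1, B returns 1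
import Mathlib
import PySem

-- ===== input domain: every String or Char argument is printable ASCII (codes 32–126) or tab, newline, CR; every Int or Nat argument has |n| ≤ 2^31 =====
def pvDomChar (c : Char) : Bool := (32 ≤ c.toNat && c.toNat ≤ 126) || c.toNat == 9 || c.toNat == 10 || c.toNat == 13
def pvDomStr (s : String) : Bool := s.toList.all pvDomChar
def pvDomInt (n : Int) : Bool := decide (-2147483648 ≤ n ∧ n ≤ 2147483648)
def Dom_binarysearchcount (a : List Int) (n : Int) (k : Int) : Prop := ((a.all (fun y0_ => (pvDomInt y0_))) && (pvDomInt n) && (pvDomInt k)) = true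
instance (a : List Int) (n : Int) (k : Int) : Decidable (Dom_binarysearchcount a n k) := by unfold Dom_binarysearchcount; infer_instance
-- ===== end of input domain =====

-- B replaces A's iterative while-loop with mutable left/right/count bounds by a
-- structural recursion on list slices (window sublist + base offset), combining
-- results ("deeper success or base+m+1"); alternative decomposition, not faster.


-- ===== PORT A =====
-- A's while-loop over the state (left, right, count); terminates as right+1-left shrinks.
-- Python's mid = int((right+left)/2) is ported as floor division: whenever the loop body
-- runs, 0 ≤ left ≤ right, so right+left ≥ 0 (truncation = floor) and within Dom the float
-- division is exact.  a[mid] is pyGetD with default 0: under Pre_ (n ≤ len a) every probed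
-- index is in range, so the default is never consulted.
def goA (a : List Int) (k left right count : Int) : Int :=
  if _h : left ≤ right then
    let mid := PySem.Int.floordiv (right + left) 2
    if PySem.List.pyGetD a mid 0 ≤ k then
      goA a k (mid + 1) right (mid + 1)
    else
      goA a k left (mid - 1) count
  else
    count
termination_by (right + 1 - left).toNat
decreasing_by
  · have h1 := PySem.Int.floordiv_two_mid_bounds (lo := left) (hi := right) _h
    have h2 : PySem.Int.floordiv (right + left) 2 = PySem.Int.floordiv (left + right) 2 := by
      ring_nf
    omega
  · have h1 := PySem.Int.floordiv_two_mid_bounds (lo := left) (hi := right) _h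
    have h2 : PySem.Int.floordiv (right + left) 2 = PySem.Int.floordiv (left + right) 2 := by
      ring_nf
    omega

def binarysearchcount (a : List Int) (n : Int) (k : Int) : Int :=
  goA a k 0 (n - 1) 0

-- ===== PORT B =====
-- B's helper go(seg, base): structural recursion on the window sublist.  Python's
-- seg[m] with 0 ≤ m < len(seg) is exactly List.getD; seg[m+1:] is List.drop (m+1),
-- seg[:m] is List.take m, and a[:n] for n > 0 is List.take n.toNat (exact: the
-- slice bounds are nonnegative).  `r if r else base+m+1` tests r = 0 (falsy).
def goB (k : Int) (seg : List Int) (base : Int) : Int :=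
  if _h : seg = [] then 0
  else
    let m := (seg.length - 1) / 2
    if seg.getD m 0 ≤ k then
      let r := goB k (seg.drop (m + 1)) (base + (m : Int) + 1)
      if r = 0 then base + (m : Int) + 1 else r
    else
      goB k (seg.take m) base
termination_by seg.length
decreasing_by
  · have : 0 < seg.length := List.length_pos_iff.mpr _h
    simp only [List.length_drop]; omega
  · have : 0 < seg.length := List.length_pos_iff.mpr _h
    have hm : (seg.length - 1) / 2 < seg.length := by omega
    simp only [List.length_take]; omega

def binarysearchcount_alt (a : List Int) (n : Int) (k : Int) : Int :=
  if n ≤ 0 then 0 else goB k (a.take n.toNat) 0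

-- ===== PRECONDITION & SPEC =====
-- Pre_ excludes n > len(a): there the search may probe an index ≥ len(a) and Python's A
-- raises IndexError (on a few such inputs the probes happen to stay in range and A
-- returns; B clamps the window to the real array there, see claim cites).
def Pre_binarysearchcount (a : List Int) (n : Int) (k : Int) : Prop :=
  n ≤ (a.length : Int)
instance (a : List Int) (n : Int) (k : Int) : Decidable (Pre_binarysearchcount a n k) := by
  unfold Pre_binarysearchcount; infer_instance

def pvWitness_binarysearchcount : List Int × Int × Int := ([1, 2, 3], 3, 2)

def Spec_binarysearchcount (a : List Int) (n : Int) (k : Int) (out : Int) : Prop := out = binarysearchcount_alt a n k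
instance (a : List Int) (n : Int) (k : Int) (out : Int) : Decidable (Spec_binarysearchcount a n k out) := by unfold Spec_binarysearchcount; infer_instance

-- ===== CLAIM (what is proved, stated in full; the proofs are below) =====
def Claim_equal_binarysearchcount : Prop := ∀ (a : List Int) (n : Int) (k : Int), Dom_binarysearchcount a n k → Pre_binarysearchcount a n k → Spec_binarysearchcount a n k (binarysearchcount a n k)

-- ===== LEMMAS AND PROOFS =====
-- Correspondence: A's loop from state (left, right, count) returns what B's helper
-- returns on the window a[left..right] with base left, unless that is 0 (no success
-- anywhere on the search path), in which case it returns the accumulated count.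
-- Proved by induction on a fuel bound f ≥ (right+1-left).toNat, the shared measure;
-- the invariants 0 ≤ left (success values base+m+1 are positive, keeping 0 an
-- unambiguous "no success" marker, and indices align) and right+1 ≤ len a (the
-- window really holds right+1-left elements) are maintained by both branches.
theorem goA_eq_goB_aux (a : List Int) (k : Int) :
    ∀ (f : Nat) (left right count : Int), (right + 1 - left).toNat ≤ f →
      0 ≤ left → right + 1 ≤ (a.length : Int) →
      goA a k left right count =
        (if goB k ((a.drop left.toNat).take (right + 1 - left).toNat) left = 0 then count
         else goB k ((a.drop left.toNat).take (right + 1 - left).toNat) left) := by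
  intro f
  induction f with
  | zero =>
    intro left right count hf _ _
    have hs0 : (right + 1 - left).toNat = 0 := by omega
    rw [goA, goB, dif_neg (by omega : ¬ left ≤ right)]
    simp [hs0]
  | succ f ih =>
    intro left right count hf hleft hlen
    by_cases h : left ≤ right
    · -- the window is nonempty; its midpoint is A's mid, relative to the base
      have hA : PySem.Int.floordiv (right + left) 2
          = left + ((((right + 1 - left).toNat - 1) / 2 : Nat) : Int) := by
        rw [PySem.Int.floordiv_eq_ediv_of_pos (by omega : (0:Int) < 2)]
        omega
      generalize hs : (right + 1 - left).toNat = s at hf hA ⊢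
      have hlenwin : ((a.drop left.toNat).take s).length = s := by
        simp only [List.length_take, List.length_drop]; omega
      have hne : (a.drop left.toNat).take s ≠ [] := by
        intro he; rw [he] at hlenwin; simp at hlenwin; omega
      have hmBlt : (s - 1) / 2 < s := by omega
      have hidx : ((a.drop left.toNat).take s).getD ((s - 1) / 2) 0
          = PySem.List.pyGetD a (left + (((s - 1) / 2 : Nat) : Int)) 0 := by
        have h1 : ((a.drop left.toNat).take s).getD ((s - 1) / 2) 0
            = a.getD (left.toNat + (s - 1) / 2) 0 := by
          rw [List.getD_eq_getElem?_getD, List.getD_eq_getElem?_getD,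
            List.getElem?_take_of_lt hmBlt, List.getElem?_drop]
        have h2 : left + (((s - 1) / 2 : Nat) : Int)
            = ((left.toNat + (s - 1) / 2 : Nat) : Int) := by omega
        rw [h1, h2, PySem.List.pyGetD_natCast]
      rw [goA, goB, dif_pos h, dif_neg hne]
      simp only [hA, hlenwin, hidx]
      by_cases hle : PySem.List.pyGetD a (left + (((s - 1) / 2 : Nat) : Int)) 0 ≤ k
      · -- success: both recurse into the right half, B's base becomes A's new count
        simp only [if_pos hle]
        have hdropwin : ((a.drop left.toNat).take s).drop ((s - 1) / 2 + 1)
            = (a.drop (left + (((s - 1) / 2 : Nat) : Int) + 1).toNat).take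
                (right + 1 - (left + (((s - 1) / 2 : Nat) : Int) + 1)).toNat := by
          have e1 : s - ((s - 1) / 2 + 1)
              = (right + 1 - (left + (((s - 1) / 2 : Nat) : Int) + 1)).toNat := by omega
          have e2 : left.toNat + ((s - 1) / 2 + 1)
              = (left + (((s - 1) / 2 : Nat) : Int) + 1).toNat := by omega
          rw [List.drop_take, List.drop_drop, e1, e2]
        rw [hdropwin,
          ih (left + (((s - 1) / 2 : Nat) : Int) + 1) right
            (left + (((s - 1) / 2 : Nat) : Int) + 1) (by omega) (by omega) hlen]
        have hX : left + (((s - 1) / 2 : Nat) : Int) + 1 ≠ 0 := by omega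
        by_cases h0 : goB k
            ((a.drop (left + (((s - 1) / 2 : Nat) : Int) + 1).toNat).take
              (right + 1 - (left + (((s - 1) / 2 : Nat) : Int) + 1)).toNat)
            (left + (((s - 1) / 2 : Nat) : Int) + 1) = 0
        · rw [if_pos h0, if_neg hX]
        · rw [if_neg h0, if_neg h0]
      · -- failure: both recurse into the left half, window take = shorter take
        simp only [if_neg hle]
        have htakewin : ((a.drop left.toNat).take s).take ((s - 1) / 2)
            = (a.drop left.toNat).take
                (left + (((s - 1) / 2 : Nat) : Int) - 1 + 1 - left).toNat := by
          have e3 : min ((s - 1) / 2) s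
              = (left + (((s - 1) / 2 : Nat) : Int) - 1 + 1 - left).toNat := by omega
          rw [List.take_take, e3]
        rw [htakewin]
        exact ih left (left + (((s - 1) / 2 : Nat) : Int) - 1) count (by omega) hleft (by omega)
    · have hs0 : (right + 1 - left).toNat = 0 := by omega
      rw [goA, goB, dif_neg h]
      simp [hs0]

-- ===== VERDICT (by name: the statement is the Claim_ definition above) =====
theorem binarysearchcount_spec : Claim_equal_binarysearchcount := by
  intro a n k _hdom hpre
  unfold Spec_binarysearchcount binarysearchcount binarysearchcount_alt
  by_cases hn : n ≤ 0
  · rw [goA, dif_neg (by omega : ¬ (0 : Int) ≤ n - 1)]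
    simp [hn]
  · have hpre' : n ≤ (a.length : Int) := hpre
    rw [goA_eq_goB_aux a k (n - 1 + 1 - 0).toNat 0 (n - 1) 0 le_rfl le_rfl (by omega)]
    have hw : (a.drop (0 : Int).toNat).take (n - 1 + 1 - 0).toNat = a.take n.toNat := by
      simp
    rw [hw, if_neg hn]
    by_cases h0 : goB k (a.take n.toNat) 0 = 0 <;> simp [h0]
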